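-- pv_equiv track=rewrite | github.com/cisselamine00/MathMode2024 | homework01/caesar.py | caesar_breaker
-- ===== SOURCE A (Python) =====
-- import typing as tp
--
-- def decrypt_caesar(ciphertext: str, shift: int = 3) -> str:
--     """
--
--     >>> decrypt_caesar("SBWKRQ")
--     'PYTHON'
--     >>> decrypt_caesar("sbwkrq")
--     'python'
--     >>> decrypt_caesar("Sbwkrq3.6")
--     'Python3.6'
--     >>> decrypt_caesar("")
--     ''
--     """
--     plaintext = ""
--     for char in ciphertext:
--         if char.isalpha():
--             shift_amount = (ord(char.lower()) - ord('a') - shift) % 26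
--             shifted_char = chr(ord('a') + shift_amount) if char.islower() else chr(ord('A') + shift_amount)
--             plaintext += shifted_char
--         else:
--             plaintext += char
--     return plaintext
--
-- def caesar_breaker(ciphertext: str, dictionary: tp.Set[str]) -> int:
--     """
--     >>> d = {"python", "java", "ruby"}
--     >>> caesar_breaker("python", d)
--     0
--     >>> caesar_breaker("sbwkrq", d)
--     3
--     """
--     best_shift = 0
--     max_matches = 0
--     for shift in range(26):
--         matches = 0
--         decrypted = decrypt_caesar(ciphertext, shift)
--         for word in decrypted.split():
--             if word.lower() in dictionary:
--                 matches += 1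
--         if matches > max_matches:
--             max_matches = matches
--             best_shift = shift
--     return best_shift
-- ===== SOURCE B (Python) =====
-- def decrypt_caesar(ciphertext: str, shift: int = 3) -> str:
--     plaintext = ""
--     for char in ciphertext:
--         if char.isalpha():
--             shift_amount = (ord(char.lower()) - ord('a') - shift) % 26
--             shifted_char = chr(ord('a') + shift_amount) if char.islower() else chr(ord('A') + shift_amount)
--             plaintext += shifted_char
--         else:
--             plaintext += char
--     return plaintext
--
-- def caesar_breaker(ciphertext: str, dictionary) -> int:
--     # Split once; build a per-shift score table word by word, then one argmax pass.
--     words = ciphertext.split()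
--     counts = [0] * 26
--     for word in words:
--         for shift in range(26):
--             if decrypt_caesar(word, shift).lower() in dictionary:
--                 counts[shift] += 1
--     best_shift = 0
--     max_matches = 0
--     for shift in range(26):
--         if counts[shift] > max_matches:
--             max_matches = counts[shift]
--             best_shift = shift
--     return best_shift
-- ===== Notes on version B (the rewrite author's own statement) =====
-- stated objective: alternative
-- what changed: B splits the ciphertext into words once and inverts the loop nesting: for each word it scores all 26 shifts into a counts table (decrypting only that word), then a separate argmax pass over the table picks the first best shift, instead of re-decrypting and re-splitting the full text once per shift with an inline running maximum.
import Mathlib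
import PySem

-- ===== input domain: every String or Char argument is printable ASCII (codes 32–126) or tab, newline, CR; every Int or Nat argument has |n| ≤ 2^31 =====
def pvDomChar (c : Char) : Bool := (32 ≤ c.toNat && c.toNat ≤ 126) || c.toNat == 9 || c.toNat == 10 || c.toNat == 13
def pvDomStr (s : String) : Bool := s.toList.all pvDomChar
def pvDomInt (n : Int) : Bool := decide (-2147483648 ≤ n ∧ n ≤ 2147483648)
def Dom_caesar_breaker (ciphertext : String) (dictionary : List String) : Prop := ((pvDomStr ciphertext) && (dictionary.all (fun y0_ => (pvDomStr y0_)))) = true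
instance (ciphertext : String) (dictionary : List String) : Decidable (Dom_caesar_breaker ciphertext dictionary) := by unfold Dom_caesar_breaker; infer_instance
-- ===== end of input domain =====

-- B splits the ciphertext into words once, scores all 26 shifts per word into a counts
-- table, then picks the best shift in a separate argmax pass (objective: alternative).

-- ===== PORT A =====
-- shared helper: both Pythons contain the identical decrypt_caesar function
def decryptCaesar (ciphertext : String) (shift : Int) : String :=
  ciphertext.toList.foldl (fun plaintext char =>
    if PySem.Chars.isalpha char then
      let shift_amount : Int := PySem.Int.mod (((PySem.Chars.lowerChar char).toNat : Int) - 97 - shift) 26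
      let shifted_char : Char :=
        if PySem.Chars.islower char then Char.ofNat (97 + shift_amount).toNat
        else Char.ofNat (65 + shift_amount).toNat
      plaintext.push shifted_char
    else plaintext.push char) ""

def caesar_breaker (ciphertext : String) (dictionary : List String) : Int :=
  let r := (PySem.List.pyRange 0 26 1).foldl (fun (st : Int × Int) shift =>
    let best_shift := st.1
    let max_matches := st.2
    let decrypted := decryptCaesar ciphertext shift
    let matches_ : Int := (PySem.Str.split₀ decrypted).foldl (fun (m : Int) word =>
      if dictionary.contains (PySem.Str.lower word) then m + 1 else m) 0
    if matches_ > max_matches then (shift, matches_) else (best_shift, max_matches)) (0, 0)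
  r.1

-- ===== PORT B =====
def caesar_breaker_alt (ciphertext : String) (dictionary : List String) : Int :=
  let words := PySem.Str.split₀ ciphertext
  let counts0 : List Int := List.replicate 26 0
  let counts := words.foldl (fun counts word =>
    (PySem.List.pyRange 0 26 1).foldl (fun counts shift =>
      if dictionary.contains (PySem.Str.lower (decryptCaesar word shift)) then
        counts.set shift.toNat (counts.getD shift.toNat 0 + 1)
      else counts) counts) counts0
  let r := (PySem.List.pyRange 0 26 1).foldl (fun (st : Int × Int) shift =>
    let best_shift := st.1
    let max_matches := st.2
    let c := counts.getD shift.toNat 0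
    if c > max_matches then (shift, c) else (best_shift, max_matches)) (0, 0)
  r.1

-- ===== PRECONDITION & SPEC =====
def Spec_caesar_breaker (ciphertext : String) (dictionary : List String) (out : Int) : Prop := out = caesar_breaker_alt ciphertext dictionary
instance (ciphertext : String) (dictionary : List String) (out : Int) : Decidable (Spec_caesar_breaker ciphertext dictionary out) := by unfold Spec_caesar_breaker; infer_instance

-- ===== CLAIM (what is proved, stated in full; the proofs are below) =====
def Claim_equal_caesar_breaker : Prop := ∀ (ciphertext : String) (dictionary : List String), Dom_caesar_breaker ciphertext dictionary → Spec_caesar_breaker ciphertext dictionary (caesar_breaker ciphertext dictionary)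

-- ===== LEMMAS AND PROOFS =====

-- the per-character action of decrypt_caesar
def pvDc (shift : Int) (char : Char) : Char :=
  if PySem.Chars.isalpha char then
    let shift_amount : Int := PySem.Int.mod (((PySem.Chars.lowerChar char).toNat : Int) - 97 - shift) 26
    if PySem.Chars.islower char then Char.ofNat (97 + shift_amount).toNat
    else Char.ofNat (65 + shift_amount).toNat
  else char

theorem pvMod26_bounds (a : Int) : 0 ≤ PySem.Int.mod a 26 ∧ PySem.Int.mod a 26 < 26 := by
  have h : PySem.Int.mod a 26 = a % 26 := by
    simp [PySem.Int.mod, Int.fmod_eq_emod]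
  rw [h]
  exact ⟨Int.emod_nonneg a (by norm_num), Int.emod_lt_of_pos a (by norm_num)⟩

theorem pvDecrypt_toList (s : String) (shift : Int) :
    (decryptCaesar s shift).toList = s.toList.map (pvDc shift) := by
  suffices h : ∀ (l : List Char) (acc : String),
      (l.foldl (fun plaintext char =>
        if PySem.Chars.isalpha char then
          let shift_amount : Int := PySem.Int.mod (((PySem.Chars.lowerChar char).toNat : Int) - 97 - shift) 26
          let shifted_char : Char :=
            if PySem.Chars.islower char then Char.ofNat (97 + shift_amount).toNat
            else Char.ofNat (65 + shift_amount).toNat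
          plaintext.push shifted_char
        else plaintext.push char) acc).toList = acc.toList ++ l.map (pvDc shift) by
    unfold decryptCaesar
    rw [h s.toList ""]
    rfl
  intro l
  induction l with
  | nil => intro acc; simp
  | cons c rest ih =>
    intro acc
    simp only [List.foldl_cons, List.map_cons, ih]
    by_cases hc : PySem.Chars.isalpha c = true <;>
      by_cases hl : PySem.Chars.islower c = true <;>
      simp [pvDc, hc, hl, String.toList_push]

theorem pvIsalpha_bounds (c : Char) (h : PySem.Chars.isalpha c = true) :
    (65 ≤ c.toNat ∧ c.toNat ≤ 90) ∨ (97 ≤ c.toNat ∧ c.toNat ≤ 122) := by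
  simp only [PySem.Chars.isalpha, PySem.Chars.isupper, PySem.Chars.islower, Bool.or_eq_true,
    Bool.and_eq_true, decide_eq_true_eq, Char.le_def, UInt32.le_iff_toNat_le] at h
  have eA : ('A' : Char).val.toNat = 65 := by decide
  have eZ : ('Z' : Char).val.toNat = 90 := by decide
  have ea : ('a' : Char).val.toNat = 97 := by decide
  have ez : ('z' : Char).val.toNat = 122 := by decide
  simp only [Char.toNat]
  omega

theorem pvIsspace_of_range (n : Nat) (h1 : 65 ≤ n) (h2 : n ≤ 122) :
    PySem.Chars.isspace (Char.ofNat n) = false := by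
  have hv : (Char.ofNat n).toNat = n := by
    rw [Char.toNat_ofNat, if_pos]
    left; omega
  simp only [PySem.Chars.isspace, hv]
  simp only [Bool.or_eq_false_iff, Bool.and_eq_false_iff, decide_eq_false_iff_not]
  omega

theorem pvIsspace_alpha (c : Char) (h : PySem.Chars.isalpha c = true) :
    PySem.Chars.isspace c = false := by
  have hb := pvIsalpha_bounds c h
  simp only [PySem.Chars.isspace]
  simp only [Bool.or_eq_false_iff, Bool.and_eq_false_iff, decide_eq_false_iff_not]
  omega

theorem pvDc_isspace (shift : Int) (c : Char) :
    PySem.Chars.isspace (pvDc shift c) = PySem.Chars.isspace c := by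
  by_cases hc : PySem.Chars.isalpha c = true
  · rw [pvIsspace_alpha c hc]
    unfold pvDc
    rw [if_pos hc]
    obtain ⟨hm0, hm1⟩ := pvMod26_bounds (((PySem.Chars.lowerChar c).toNat : Int) - 97 - shift)
    by_cases hl : PySem.Chars.islower c = true
    · rw [if_pos hl]
      apply pvIsspace_of_range <;> omega
    · rw [if_neg hl]
      apply pvIsspace_of_range <;> omega
  · unfold pvDc
    rw [if_neg hc]

-- split₀ commutes with a whitespace-preserving character map
theorem pvSplitGo_map (f : Char → Char) (hf : ∀ c, PySem.Chars.isspace (f c) = PySem.Chars.isspace c)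
    (l : List Char) : ∀ (cur : List Char) (acc : List (List Char)),
    PySem.Chars.split₀.go (l.map f) (cur.map f) (acc.map (List.map f)) =
      (PySem.Chars.split₀.go l cur acc).map (List.map f) := by
  induction l with
  | nil =>
    intro cur acc
    rw [List.map_nil, PySem.Chars.split₀.go.eq_def, PySem.Chars.split₀.go.eq_def]
    simp only [List.isEmpty_map]
    by_cases hc : cur.isEmpty = true <;> simp [hc]
  | cons c rest ih =>
    intro cur acc
    rw [List.map_cons, PySem.Chars.split₀.go.eq_def]
    conv_rhs => rw [PySem.Chars.split₀.go.eq_def]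
    simp only [hf c, List.isEmpty_map]
    by_cases hs : PySem.Chars.isspace c = true
    · by_cases hc : cur.isEmpty = true
      · simp only [hs, hc, if_true]
        have := ih ([] : List Char) acc
        simpa using this
      · simp only [hs, hc, if_true, if_false, Bool.false_eq_true]
        have := ih ([] : List Char) (cur.reverse :: acc)
        simpa using this
    · simp only [hs, Bool.false_eq_true, if_false]
      have := ih (c :: cur) acc
      simpa using this

theorem pvSplit_map (f : Char → Char) (hf : ∀ c, PySem.Chars.isspace (f c) = PySem.Chars.isspace c)
    (l : List Char) :
    PySem.Chars.split₀ (l.map f) = (PySem.Chars.split₀ l).map (List.map f) := by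
  unfold PySem.Chars.split₀
  have := pvSplitGo_map f hf l [] []
  simpa using this

theorem pvDecrypt_ofList (ws : List Char) (shift : Int) :
    decryptCaesar (String.ofList ws) shift = String.ofList (ws.map (pvDc shift)) := by
  have h := pvDecrypt_toList (String.ofList ws) shift
  have h2 : (String.ofList ws).toList = ws := by simp
  rw [h2] at h
  calc decryptCaesar (String.ofList ws) shift
      = String.ofList (decryptCaesar (String.ofList ws) shift).toList := by rw [String.ofList_toList]
    _ = String.ofList (ws.map (pvDc shift)) := by rw [h]

-- splitting the decrypted text = decrypting each word of the split text
theorem pvSplit_decrypt (ciphertext : String) (shift : Int) :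
    PySem.Str.split₀ (decryptCaesar ciphertext shift) =
      (PySem.Str.split₀ ciphertext).map (fun w => decryptCaesar w shift) := by
  unfold PySem.Str.split₀
  rw [pvDecrypt_toList, pvSplit_map (pvDc shift) (pvDc_isspace shift)]
  rw [List.map_map, List.map_map]
  apply List.map_congr_left
  intro ws _
  simp only [Function.comp_apply]
  rw [pvDecrypt_ofList]

-- counting fold = countP
theorem pvFoldCount (p : String → Bool) (l : List String) : ∀ (m : Int),
    l.foldl (fun (m : Int) word => if p word then m + 1 else m) m = m + (l.countP p : Int) := by
  induction l with
  | nil => intro m; simp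
  | cons w rest ih =>
    intro m
    by_cases hw : p w = true <;>
      simp [hw, ih] <;> ring

-- the inner per-word loop: length preservation
theorem pvInnerLen (dictionary : List String) (word : String) (l : List Int) :
    ∀ (counts : List Int),
    (l.foldl (fun counts shift =>
      if dictionary.contains (PySem.Str.lower (decryptCaesar word shift)) then
        counts.set shift.toNat (counts.getD shift.toNat 0 + 1)
      else counts) counts).length = counts.length := by
  induction l with
  | nil => intro counts; rfl
  | cons a rest ih =>
    intro counts
    rw [List.foldl_cons, ih]
    split_ifs <;> simp

-- the inner per-word loop adds the indicator at each admissible position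
theorem pvInnerGetD (dictionary : List String) (word : String) (l : List Int) :
    ∀ (counts : List Int), counts.length = 26 → (∀ x ∈ l, 0 ≤ x ∧ x < 26) →
    ∀ (j : Int), 0 ≤ j → j < 26 →
    (l.foldl (fun counts shift =>
      if dictionary.contains (PySem.Str.lower (decryptCaesar word shift)) then
        counts.set shift.toNat (counts.getD shift.toNat 0 + 1)
      else counts) counts).getD j.toNat 0 =
      counts.getD j.toNat 0 +
        (if dictionary.contains (PySem.Str.lower (decryptCaesar word j)) then (l.count j : Int) else 0) := by
  induction l with
  | nil => intro counts _ _ j _ _; simp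
  | cons a rest ih =>
    intro counts hlen hmem j hj0 hj26
    obtain ⟨ha0, ha26⟩ := hmem a (List.mem_cons_self)
    have hmem' : ∀ x ∈ rest, 0 ≤ x ∧ x < 26 := fun x hx => hmem x (List.mem_cons_of_mem _ hx)
    simp only [List.foldl_cons]
    by_cases hind : dictionary.contains (PySem.Str.lower (decryptCaesar word a)) = true
    · rw [if_pos hind]
      have hlen' : (counts.set a.toNat (counts.getD a.toNat 0 + 1)).length = 26 := by
        simp [hlen]
      rw [ih _ hlen' hmem' j hj0 hj26]
      by_cases haj : a = j
      · subst haj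
        have hget : (counts.set a.toNat (counts.getD a.toNat 0 + 1)).getD a.toNat 0 =
            counts.getD a.toNat 0 + 1 := by
          rw [List.getD_eq_getElem?_getD, List.getElem?_set, if_pos rfl,
            if_pos (show a.toNat < counts.length by omega), Option.getD_some]
        rw [hget, if_pos hind, if_pos hind, List.count_cons_self]
        push_cast
        ring
      · have hne : a.toNat ≠ j.toNat := by omega
        have hget : (counts.set a.toNat (counts.getD a.toNat 0 + 1)).getD j.toNat 0 =
            counts.getD j.toNat 0 := by
          rw [List.getD_eq_getElem?_getD, List.getElem?_set, if_neg hne,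
            ← List.getD_eq_getElem?_getD]
        rw [hget, List.count_cons_of_ne (by omega)]
    · rw [if_neg hind]
      rw [ih _ hlen hmem' j hj0 hj26]
      by_cases haj : a = j
      · subst haj
        rw [if_neg hind, if_neg hind]
      · rw [List.count_cons_of_ne (by omega)]

-- the outer word loop accumulates countP
theorem pvOuterGetD (dictionary : List String) (words : List String) :
    ∀ (counts : List Int), counts.length = 26 → ∀ (j : Int), 0 ≤ j → j < 26 →
    (words.foldl (fun counts word =>
      (PySem.List.pyRange 0 26 1).foldl (fun counts shift =>
        if dictionary.contains (PySem.Str.lower (decryptCaesar word shift)) then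
          counts.set shift.toNat (counts.getD shift.toNat 0 + 1)
        else counts) counts) counts).getD j.toNat 0 =
      counts.getD j.toNat 0 +
        ((words.countP (fun w => dictionary.contains (PySem.Str.lower (decryptCaesar w j)))) : Int) := by
  induction words with
  | nil => intro counts _ j _ _; simp
  | cons w rest ih =>
    intro counts hlen j hj0 hj26
    simp only [List.foldl_cons]
    have hmem : ∀ x ∈ PySem.List.pyRange 0 26 1, 0 ≤ x ∧ x < 26 := by
      intro x hx
      exact PySem.List.mem_pyRange_one.mp hx
    have hlen' : ((PySem.List.pyRange 0 26 1).foldl (fun counts shift =>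
        if dictionary.contains (PySem.Str.lower (decryptCaesar w shift)) then
          counts.set shift.toNat (counts.getD shift.toNat 0 + 1)
        else counts) counts).length = 26 := by
      rw [pvInnerLen]; exact hlen
    rw [ih _ hlen' j hj0 hj26, pvInnerGetD dictionary w _ counts hlen hmem j hj0 hj26]
    have hcnt : (PySem.List.pyRange 0 26 1).count j = 1 :=
      List.count_eq_one_of_mem (PySem.List.nodup_pyRange_one 0 26)
        (PySem.List.mem_pyRange_one.mpr ⟨hj0, hj26⟩)
    rw [hcnt, List.countP_cons]
    by_cases hind : dictionary.contains (PySem.Str.lower (decryptCaesar w j)) = true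
    · rw [if_pos hind, if_pos hind]
      push_cast
      ring
    · rw [if_neg hind, if_neg hind]
      push_cast
      ring

-- A's matches for a given shift equals B's final table entry
theorem pvMatches_eq (ciphertext : String) (dictionary : List String) (shift : Int)
    (h0 : 0 ≤ shift) (h26 : shift < 26) :
    (PySem.Str.split₀ (decryptCaesar ciphertext shift)).foldl (fun (m : Int) word =>
      if dictionary.contains (PySem.Str.lower word) then m + 1 else m) 0 =
    ((PySem.Str.split₀ ciphertext).foldl (fun counts word =>
      (PySem.List.pyRange 0 26 1).foldl (fun counts s =>
        if dictionary.contains (PySem.Str.lower (decryptCaesar word s)) then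
          counts.set s.toNat (counts.getD s.toNat 0 + 1)
        else counts) counts) (List.replicate 26 0)).getD shift.toNat 0 := by
  rw [pvFoldCount, pvSplit_decrypt, List.countP_map]
  rw [pvOuterGetD dictionary _ (List.replicate 26 0) (by simp) shift h0 h26]
  rw [List.getD_replicate _ (by omega)]
  rfl

-- ===== VERDICT (by name: the statement is the Claim_ definition above) =====
theorem caesar_breaker_spec : Claim_equal_caesar_breaker := by
  intro ciphertext dictionary _
  unfold Spec_caesar_breaker
  unfold caesar_breaker caesar_breaker_alt
  dsimp only
  apply congrArg Prod.fst
  apply PySem.List.foldl_congr_mem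
  intro st shift hshift
  obtain ⟨h0, h26⟩ := PySem.List.mem_pyRange_one.mp hshift
  rw [pvMatches_eq ciphertext dictionary shift h0 h26]
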